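-- pv_equiv track=rewrite | github.com/taehoon7289/coding_test_python | programers/[PCCP 모의고사 #1]_체육대회.py | solution
-- ===== SOURCE A (Python) =====
-- from collections import deque
--
-- def solution(ability):
--     answer = 0
--     q = deque()
--     student_cnt = len(ability)
--     type_cnt = len(ability[0])
--
--     for i in range(student_cnt):
--         q.append([[ability[i][0]], ability[0:i] + ability[i + 1:]])
--     while q:
--         jumsus, remain_students = q.popleft()
--         if len(jumsus) >= type_cnt:
--             answer = max(answer, sum(jumsus))
--         else:
--             for j in range(len(remain_students)):
--                 temp1 = jumsus + [remain_students[j][len(jumsus)]]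
--                 temp2 = remain_students[0:j] + remain_students[j + 1:]
--                 q.append([temp1, temp2])
--     return answer
-- ===== SOURCE B (Python) =====
-- def solution(ability):
--     # Bitmask DP (memoized over the set of used students) instead of BFS over all permutations.
--     n = len(ability)
--     m = len(ability[0])
--     memo = {}
--
--     def best(mask, k):
--         # best total score filling event types k..m-1 with students not in mask (None = impossible)
--         if k >= m:
--             return 0
--         if mask in memo:
--             return memo[mask]
--         res = None
--         for s in range(n):
--             if not (mask >> s) & 1:
--                 sub = best(mask | (1 << s), k + 1)
--                 if sub is not None:
--                     v = ability[s][k] + sub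
--                     if res is None or v > res:
--                         res = v
--         memo[mask] = res
--         return res
--
--     r = best(0, 0)
--     return max(0, r) if r is not None else 0
-- ===== Notes on version B (the rewrite author's own statement) =====
-- stated objective: faster
-- what changed: Replaces the BFS queue that enumerates every ordered choice of students per event type with a memoized bitmask dynamic program over the set of used students, so each used-student set is solved once instead of once per permutation reaching it.
import Mathlib
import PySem

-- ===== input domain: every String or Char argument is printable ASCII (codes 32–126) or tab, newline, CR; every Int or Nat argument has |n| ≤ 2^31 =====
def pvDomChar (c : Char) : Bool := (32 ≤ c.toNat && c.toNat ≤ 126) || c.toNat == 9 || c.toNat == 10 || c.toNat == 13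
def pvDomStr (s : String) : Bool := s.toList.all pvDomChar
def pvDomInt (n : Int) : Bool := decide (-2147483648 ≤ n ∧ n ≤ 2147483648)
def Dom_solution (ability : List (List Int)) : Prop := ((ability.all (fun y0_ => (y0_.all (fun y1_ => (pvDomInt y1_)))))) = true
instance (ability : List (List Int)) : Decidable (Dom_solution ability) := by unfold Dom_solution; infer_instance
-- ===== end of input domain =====

-- B replaces A's BFS over all ordered student choices by a memoized used-student-bitmask DP; proved equal on Pre_.

-- ===== PORT A =====
-- 'remain_students[0:j] + remain_students[j+1:]' drops the j-th row (cited by solLoop's termination proof)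
theorem child_remain_eq (remain : List (List Int)) (j : Nat) :
    PySem.List.slice remain (some 0) (some (j : Int)) ++
      PySem.List.slice remain (some ((j : Int) + 1)) none = remain.eraseIdx j := by
  have h1 : PySem.List.slice remain (some 0) (some (j : Int)) = remain.take j := by
    simp [PySem.List.slice_zero_start, PySem.List.slice_to_natCast]
  have h2 : PySem.List.slice remain (some ((j : Int) + 1)) none = remain.drop (j + 1) := by
    have hc : ((j : Int) + 1) = ((j + 1 : Nat) : Int) := by push_cast; ring
    rw [hc, PySem.List.slice_from_natCast]
  rw [h1, h2, List.eraseIdx_eq_take_drop_succ]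

-- termination measure facts for solLoop (cited in its decreasing_by)
theorem measureTail_lt (a : List Int × List (List Int)) (rest : List (List Int × List (List Int))) :
    (List.map (fun it => (it.2.length + 1).factorial) rest).sum
      < (List.map (fun it => (it.2.length + 1).factorial) (a :: rest)).sum := by
  simp only [List.map_cons, List.sum_cons]
  have := Nat.factorial_pos (a.2.length + 1)
  omega

theorem measureExpand_lt (jumsus : List Int) (remain : List (List Int))
    (rest : List (List Int × List (List Int))) :
    (List.map (fun it => (it.2.length + 1).factorial)
      (rest ++ (List.range remain.length).map (fun (j : Nat) =>
        (jumsus ++ [PySem.List.pyGetD (PySem.List.pyGetD remain (j : Int) []) (jumsus.length : Int) 0],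
         PySem.List.slice remain (some 0) (some (j : Int)) ++
           PySem.List.slice remain (some ((j : Int) + 1)) none)))).sum
    < (List.map (fun it => (it.2.length + 1).factorial) ((jumsus, remain) :: rest)).sum := by
  simp only [List.map_append, List.map_cons, List.sum_append, List.sum_cons, List.map_map,
    Function.comp_def]
  have hsum : ((List.range remain.length).map (fun (j : Nat) =>
      ((PySem.List.slice remain (some 0) (some (j : Int)) ++
        PySem.List.slice remain (some ((j : Int) + 1)) none).length + 1).factorial)).sum
      ≤ remain.length * remain.length.factorial := by
    have hb : ∀ x ∈ (List.range remain.length).map (fun (j : Nat) =>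
        ((PySem.List.slice remain (some 0) (some (j : Int)) ++
          PySem.List.slice remain (some ((j : Int) + 1)) none).length + 1).factorial),
        x ≤ remain.length.factorial := by
      intro x hx
      obtain ⟨j, hj, rfl⟩ := List.mem_map.mp hx
      have hj' := List.mem_range.mp hj
      rw [child_remain_eq remain j]
      have hlen : (remain.eraseIdx j).length = remain.length - 1 := by
        simp [List.length_eraseIdx, hj']
      rw [hlen]
      exact Nat.factorial_le (by omega)
    have := List.sum_le_card_nsmul _ _ hb
    simpa [smul_eq_mul] using this
  have hfac : (remain.length + 1).factorial = (remain.length + 1) * remain.length.factorial :=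
    Nat.factorial_succ _
  have hmul : (remain.length + 1) * remain.length.factorial
      = remain.length * remain.length.factorial + remain.length.factorial := by ring
  have := Nat.factorial_pos remain.length
  omega

-- Prod.Lex measure facts for the mutual bestA/bestLoop recursion (cited in decreasing_by)
theorem lexA_lt (m k len : Nat) (h : ¬ m ≤ k) :
    Prod.Lex (fun a₁ a₂ : Nat => a₁ < a₂) (fun a₁ a₂ : Nat => a₁ < a₂)
      ((if m ≤ k then 1 else 2 * (m - k) + 1), len) ((if m ≤ k then 0 else 2 * (m - k) + 2), 0) := by
  apply Prod.Lex.left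
  split_ifs <;> omega

theorem lexLoopA_lt (m k len : Nat) :
    Prod.Lex (fun a₁ a₂ : Nat => a₁ < a₂) (fun a₁ a₂ : Nat => a₁ < a₂)
      ((if m ≤ k + 1 then 0 else 2 * (m - (k + 1)) + 2), 0)
      ((if m ≤ k then 1 else 2 * (m - k) + 1), len) := by
  apply Prod.Lex.left
  split_ifs <;> omega

theorem lexLoopTail_lt (c : Nat) (s : Nat) (rest : List Nat) :
    Prod.Lex (fun a₁ a₂ : Nat => a₁ < a₂) (fun a₁ a₂ : Nat => a₁ < a₂)
      (c, rest.length) (c, (s :: rest).length) :=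
  Prod.Lex.right c (Nat.lt_succ_self rest.length)

-- the while-loop over the deque; FIFO: pop at the head, append children at the tail
def solLoop (typeCnt : Nat) (answer : Int) (q : List (List Int × List (List Int))) : Int :=
  match q with
  | [] => answer
  | (jumsus, remain) :: rest =>
    if typeCnt ≤ jumsus.length then
      solLoop typeCnt (max answer jumsus.sum) rest
    else
      solLoop typeCnt answer (rest ++ (List.range remain.length).map (fun (j : Nat) =>
        (jumsus ++ [PySem.List.pyGetD (PySem.List.pyGetD remain (j : Int) []) (jumsus.length : Int) 0],
         PySem.List.slice remain (some 0) (some (j : Int)) ++ PySem.List.slice remain (some ((j : Int) + 1)) none)))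
  termination_by (q.map (fun it => (it.2.length + 1).factorial)).sum
  decreasing_by
  · exact measureTail_lt (jumsus, remain) rest
  · exact measureExpand_lt jumsus remain rest

def solution (ability : List (List Int)) : Int :=
  let student_cnt := ability.length
  let type_cnt := (PySem.List.pyGetD ability (0 : Int) []).length
  let q := (List.range student_cnt).map (fun (i : Nat) =>
    ([PySem.List.pyGetD (PySem.List.pyGetD ability (i : Int) []) (0 : Int) 0],
     PySem.List.slice ability (some 0) (some (i : Int)) ++ PySem.List.slice ability (some ((i : Int) + 1)) none))
  solLoop type_cnt 0 q

-- ===== PORT B =====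
mutual
-- best(mask, k): best total for event types k..m-1 over students not in mask (none = Python None)
def bestA (ability : List (List Int)) (n m : Nat) (mask k : Nat)
    (memo : PySem.Dict Nat (Option Int)) : Option Int × PySem.Dict Nat (Option Int) :=
  if m ≤ k then (some 0, memo)
  else
    match memo.get? mask with
    | some v => (v, memo)
    | none =>
      let p := bestLoop ability n m mask k (List.range n) none memo
      (p.1, p.2.insert mask p.1)
  termination_by ((if m ≤ k then 0 else 2 * (m - k) + 2 : Nat), 0)
  decreasing_by exact lexA_lt m k (List.range n).length (by assumption)

-- the 'for s in range(n)' loop of best, threading res and the memo table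
def bestLoop (ability : List (List Int)) (n m : Nat) (mask k : Nat) (ss : List Nat)
    (res : Option Int) (memo : PySem.Dict Nat (Option Int)) : Option Int × PySem.Dict Nat (Option Int) :=
  match ss with
  | [] => (res, memo)
  | s :: rest =>
    if (mask >>> s) &&& 1 = 0 then
      let p := bestA ability n m (mask ||| (1 <<< s)) (k + 1) memo
      match p.1 with
      | none => bestLoop ability n m mask k rest res p.2
      | some subv =>
        let v := PySem.List.pyGetD (PySem.List.pyGetD ability (s : Int) []) (k : Int) 0 + subv
        let res' := match res with
          | none => some v
          | some r => if r < v then some v else some r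
        bestLoop ability n m mask k rest res' p.2
    else
      bestLoop ability n m mask k rest res memo
  termination_by ((if m ≤ k then 1 else 2 * (m - k) + 1 : Nat), ss.length)
  decreasing_by
  · exact lexLoopA_lt m k (s :: rest).length
  · exact lexLoopTail_lt _ s rest
  · exact lexLoopTail_lt _ s rest
  · exact lexLoopTail_lt _ s rest
end

def solution_alt (ability : List (List Int)) : Int :=
  let n := ability.length
  let m := (PySem.List.pyGetD ability (0 : Int) []).length
  let r := (bestA ability n m 0 0 PySem.Dict.empty).1
  match r with
  | some rv => max 0 rv
  | none => 0

-- ===== PRECONDITION & SPEC =====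
-- Exactly the inputs on which the Python A returns (no IndexError): a nonempty list, a nonempty
-- first row, and every row at least min(len(first row), number of rows) long.
def Pre_solution (ability : List (List Int)) : Prop :=
  ability ≠ [] ∧ 1 ≤ (ability.headD []).length ∧
    ∀ r ∈ ability, min (ability.headD []).length ability.length ≤ r.length
instance (ability : List (List Int)) : Decidable (Pre_solution ability) := by
  unfold Pre_solution; infer_instance

def pvWitness_solution : List (List Int) := [[1, 2], [3, 4], [5, 6]]

def Spec_solution (ability : List (List Int)) (out : Int) : Prop := out = solution_alt ability
instance (ability : List (List Int)) (out : Int) : Decidable (Spec_solution ability out) := by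
  unfold Spec_solution; infer_instance

-- ===== CLAIM (what is proved, stated in full; the proofs are below) =====
def Claim_equal_solution : Prop := ∀ (ability : List (List Int)), Dom_solution ability →
  Pre_solution ability → Spec_solution ability (solution ability)

-- ===== LEMMAS AND PROOFS =====

-- Option Int as "best so far" (none = Python None); upd is B's 'if res is None or v > res'
def upd (res : Option Int) (v : Int) : Option Int :=
  match res with
  | none => some v
  | some r => if r < v then some v else some r

def ocomb (res sub : Option Int) : Option Int :=
  match sub with
  | none => res
  | some v => upd res v

def omaxL (l : List Int) : Option Int := l.foldl upd none

theorem upd_some (r v : Int) : upd (some r) v = some (max r v) := by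
  simp only [upd]
  split_ifs with h
  · rw [max_eq_right (le_of_lt h)]
  · rw [max_eq_left (not_lt.mp h)]

theorem ocomb_none_left (b : Option Int) : ocomb none b = b := by cases b <;> rfl

theorem ocomb_some_some (a b : Int) : ocomb (some a) (some b) = some (max a b) := upd_some a b

theorem ocomb_comm (a b : Option Int) : ocomb a b = ocomb b a := by
  cases a with
  | none => rw [ocomb_none_left]; rfl
  | some va =>
    cases b with
    | none => rw [ocomb_none_left]; rfl
    | some vb => rw [ocomb_some_some, ocomb_some_some, max_comm]

theorem ocomb_assoc (a b c : Option Int) : ocomb (ocomb a b) c = ocomb a (ocomb b c) := by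
  cases b with
  | none =>
    show ocomb a c = ocomb a (ocomb none c)
    rw [ocomb_none_left]
  | some vb =>
    cases c with
    | none => rfl
    | some vc =>
      show ocomb (upd a vb) (some vc) = ocomb a (ocomb (some vb) (some vc))
      rw [ocomb_some_some]
      cases a with
      | none =>
        show upd (some vb) vc = ocomb none (some (max vb vc))
        rw [upd_some, ocomb_none_left]
      | some va =>
        show upd (upd (some va) vb) vc = ocomb (some va) (some (max vb vc))
        rw [upd_some, upd_some, ocomb_some_some, max_assoc]

theorem foldl_upd_eq (l : List Int) : ∀ r : Option Int, l.foldl upd r = ocomb r (omaxL l) := by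
  induction l with
  | nil => intro r; cases r <;> rfl
  | cons x t ih =>
    intro r
    show t.foldl upd (upd r x) = ocomb r (omaxL (x :: t))
    have h1 : omaxL (x :: t) = ocomb (some x) (omaxL t) := ih (some x)
    rw [ih (upd r x), h1, ← ocomb_assoc]
    rfl

theorem omaxL_append (l1 l2 : List Int) : omaxL (l1 ++ l2) = ocomb (omaxL l1) (omaxL l2) := by
  simp only [omaxL, List.foldl_append]
  exact foldl_upd_eq l2 _

theorem foldl_upd_some (l : List Int) : ∀ x : Int, l.foldl upd (some x) = some (l.foldl max x) := by
  induction l with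
  | nil => intro x; rfl
  | cons y t ih =>
    intro x
    show t.foldl upd (upd (some x) y) = _
    rw [upd_some, ih (max x y)]
    rfl

theorem foldl_max_max (t : List Int) : ∀ a x : Int, t.foldl max (max a x) = max a (t.foldl max x) := by
  induction t with
  | nil => intro a x; rfl
  | cons y t ih =>
    intro a x
    show t.foldl max (max (max a x) y) = max a ((y :: t).foldl max x)
    rw [max_assoc]
    exact ih a (max x y)

theorem foldl_max_elim (l : List Int) (a : Int) : l.foldl max a = (omaxL l).elim a (max a) := by
  cases l with
  | nil => rfl
  | cons x t =>
    have h1 : omaxL (x :: t) = some (t.foldl max x) := foldl_upd_some t x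
    rw [h1]
    exact foldl_max_max t a x

theorem foldl_max_append_comm (a : Int) (l1 l2 : List Int) :
    (l1 ++ l2).foldl max a = (l2 ++ l1).foldl max a := by
  rw [foldl_max_elim, foldl_max_elim, omaxL_append, omaxL_append, ocomb_comm]

theorem omaxL_map_add (c : Int) (l : List Int) :
    omaxL (l.map (fun t => c + t)) = (omaxL l).map (fun t => c + t) := by
  have key : ∀ (l : List Int) (r : Option Int),
      (l.map (fun t => c + t)).foldl upd (r.map (fun t => c + t)) = (l.foldl upd r).map (fun t => c + t) := by
    intro l
    induction l with
    | nil => intro r; rfl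
    | cons x t ih =>
      intro r
      show (t.map (fun t => c + t)).foldl upd (upd (r.map (fun t => c + t)) (c + x)) = _
      have h1 : upd (r.map (fun t => c + t)) (c + x) = (upd r x).map (fun t => c + t) := by
        cases r with
        | none => rfl
        | some a =>
          simp only [Option.map_some, upd_some]
          rw [max_add_add_left]
      rw [h1]
      exact ih (upd r x)
  have := key l none
  simpa [omaxL] using this

theorem omaxL_flatMap {α : Type} (L : List α) (g : α → List Int) :
    ∀ r : Option Int, (L.flatMap g).foldl upd r = L.foldl (fun res x => ocomb res (omaxL (g x))) r := by
  induction L with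
  | nil => intro r; rfl
  | cons x t ih =>
    intro r
    simp only [List.flatMap_cons, List.foldl_append, List.foldl_cons]
    rw [foldl_upd_eq (g x) r]
    exact ih _

-- all ways to pick one element, returning (picked, rest)
def selections {α : Type} : List α → List (α × List α)
  | [] => []
  | x :: xs => (x, xs) :: (selections xs).map (fun p => (p.1, x :: p.2))

theorem length_of_mem_selections {α : Type} : ∀ (l : List α) (p : α × List α),
    p ∈ selections l → p.2.length + 1 = l.length := by
  intro l
  induction l with
  | nil => intro p hp; simp [selections] at hp
  | cons x xs ih =>
    intro p hp
    simp only [selections, List.mem_cons, List.mem_map] at hp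
    rcases hp with rfl | ⟨q, hq, rfl⟩
    · simp
    · have := ih q hq
      simp only [List.length_cons]
      omega

theorem selections_map {α β : Type} (f : α → β) : ∀ (l : List α),
    selections (l.map f) = (selections l).map (fun p => (f p.1, p.2.map f)) := by
  intro l
  induction l with
  | nil => rfl
  | cons x xs ih =>
    simp only [List.map_cons, selections, ih, List.map_map]
    congr 1

theorem selections_eq_range (rows : List (List Int)) :
    selections rows = (List.range rows.length).map (fun j => (rows.getD j [], rows.eraseIdx j)) := by
  induction rows with
  | nil => rfl
  | cons r rs ih =>
    simp only [selections, ih, List.map_map, List.length_cons, List.range_succ_eq_map,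
      List.map_cons]
    congr 1

theorem selections_nodup (l : List Nat) (h : l.Nodup) :
    selections l = l.map (fun s => (s, l.filter (fun t => t != s))) := by
  induction l with
  | nil => rfl
  | cons x xs ih =>
    have hx : x ∉ xs := (List.nodup_cons.mp h).1
    have hxs : xs.Nodup := (List.nodup_cons.mp h).2
    simp only [selections, ih hxs, List.map_map, List.map_cons]
    congr 1
    · have : (x :: xs).filter (fun t => t != x) = xs.filter (fun t => t != x) := by
        simp [List.filter_cons]
      rw [this, List.filter_eq_self.mpr]
      intro t ht
      simp only [bne_iff_ne, ne_eq]
      exact fun he => hx (he ▸ ht)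
    · apply List.map_congr_left
      intro s hs
      have hxne : x ≠ s := fun he => hx (he ▸ hs)
      simp [Function.comp, List.filter_cons, hxne]

-- all completion sums of A's search from a state with k types filled and these rows remaining
def sums (m k : Nat) (rows : List (List Int)) : List Int :=
  if m ≤ k then [0]
  else (selections rows).attach.flatMap (fun p =>
    (sums m (k + 1) p.1.2).map (fun t => p.1.1.getD k 0 + t))
  termination_by rows.length
  decreasing_by
    have := length_of_mem_selections rows p.1 p.2
    omega

theorem flatMap_attach {α β : Type} (l : List α) (g : α → List β) :
    l.attach.flatMap (fun p => g p.1) = l.flatMap g := by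
  conv_rhs => rw [← List.attach_map_subtype_val l, List.flatMap_map]

theorem sums_eq (m k : Nat) (rows : List (List Int)) :
    sums m k rows = if m ≤ k then [0]
      else (selections rows).flatMap (fun p => (sums m (k + 1) p.2).map (fun t => p.1.getD k 0 + t)) := by
  rw [sums]
  congr 1
  exact flatMap_attach (selections rows)
    (fun q => (sums m (k + 1) q.2).map (fun t => q.1.getD k 0 + t))

def contrib (m : Nat) (it : List Int × List (List Int)) : List Int :=
  (sums m it.1.length it.2).map (fun t => it.1.sum + t)

theorem children_flatMap (m : Nat) (jumsus : List Int) (remain : List (List Int))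
    (h : ¬ m ≤ jumsus.length) :
    ((List.range remain.length).map (fun (j : Nat) =>
      (jumsus ++ [PySem.List.pyGetD (PySem.List.pyGetD remain (j : Int) []) (jumsus.length : Int) 0],
       PySem.List.slice remain (some 0) (some (j : Int)) ++
         PySem.List.slice remain (some ((j : Int) + 1)) none))).flatMap (contrib m)
      = contrib m (jumsus, remain) := by
  conv_rhs => rw [contrib]
  conv_rhs => rw [sums_eq, if_neg h, selections_eq_range]
  rw [List.flatMap_map, List.map_flatMap, List.flatMap_map, List.flatMap_def, List.flatMap_def]
  congr 1
  apply List.map_congr_left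
  intro j hj
  rw [show (PySem.List.slice remain (some 0) (some (j : Int)) ++
      PySem.List.slice remain (some ((j : Int) + 1)) none) = remain.eraseIdx j from
    child_remain_eq remain j]
  simp [contrib, Function.comp_def, List.sum_append, List.map_map, add_assoc]

theorem solLoop_eq (m : Nat) (ans : Int) (q : List (List Int × List (List Int))) :
    solLoop m ans q = (q.flatMap (contrib m)).foldl max ans := by
  induction ans, q using solLoop.induct (typeCnt := m) with
  | case1 ans => simp [solLoop]
  | case2 ans jumsus remain rest h ih =>
    rw [solLoop]
    simp only [if_pos h]
    rw [ih]
    have hc : contrib m (jumsus, remain) = [jumsus.sum] := by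
      unfold contrib
      rw [sums_eq, if_pos h]
      simp
    rw [List.flatMap_cons, hc]
    rfl
  | case3 ans jumsus remain rest h ih =>
    rw [solLoop]
    simp only [if_neg h]
    rw [ih]
    rw [List.flatMap_append, List.flatMap_cons, foldl_max_append_comm]
    rw [children_flatMap m jumsus remain h]

theorem map_getD_range (l : List (List Int)) :
    (List.range l.length).map (fun s => l.getD s []) = l := by
  induction l with
  | nil => rfl
  | cons x xs ih =>
    have he : ((fun s => (x :: xs).getD s []) ∘ Nat.succ) = fun s => xs.getD s [] := by
      funext s; rfl
    have h : (List.range xs.length).map ((fun s => (x :: xs).getD s []) ∘ Nat.succ) = xs := by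
      rw [he, ih]
    simp only [List.length_cons, List.range_succ_eq_map, List.map_cons, List.map_map, h]
    rfl

theorem solution_eq (ability : List (List Int))
    (h : 1 ≤ (PySem.List.pyGetD ability (0 : Int) []).length) :
    solution ability
      = (sums (PySem.List.pyGetD ability (0 : Int) []).length 0 ability).foldl max 0 := by
  have hq : (List.range ability.length).map (fun (i : Nat) =>
      ([PySem.List.pyGetD (PySem.List.pyGetD ability (i : Int) []) (0 : Int) 0],
       PySem.List.slice ability (some 0) (some (i : Int)) ++
         PySem.List.slice ability (some ((i : Int) + 1)) none))
      = (List.range ability.length).map (fun (j : Nat) =>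
      (([] : List Int) ++ [PySem.List.pyGetD (PySem.List.pyGetD ability (j : Int) [])
          ((List.length ([] : List Int)) : Int) 0],
       PySem.List.slice ability (some 0) (some (j : Int)) ++
         PySem.List.slice ability (some ((j : Int) + 1)) none)) := by
    apply List.map_congr_left
    intro j _
    simp
  simp only [solution]
  rw [hq, solLoop_eq, children_flatMap _ _ _ (by simp only [List.length_nil]; omega)]
  simp [contrib]

-- B's value function, memoization stripped
def Bval (ability : List (List Int)) (m k : Nat) (free : List Nat) : Option Int :=
  if m ≤ k then some 0
  else (free.map (fun s => (s, Bval ability m (k + 1) (free.filter (fun t => t != s))))).foldl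
    (fun res p => ocomb res (p.2.map (fun sv => (ability.getD p.1 []).getD k 0 + sv))) none
  termination_by m - k
  decreasing_by omega

theorem sums_Bval (ability : List (List Int)) (m : Nat) : ∀ (fuel k : Nat) (free : List Nat),
    fuel = m - k → free.Nodup →
    omaxL (sums m k (free.map (fun s => ability.getD s []))) = Bval ability m k free := by
  intro fuel
  induction fuel with
  | zero =>
    intro k free hf _
    have hmk : m ≤ k := by omega
    rw [sums_eq, if_pos hmk, Bval, if_pos hmk]
    rfl
  | succ fuel ih =>
    intro k free hf hnd
    by_cases hmk : m ≤ k
    · rw [sums_eq, if_pos hmk, Bval, if_pos hmk]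
      rfl
    · rw [sums_eq, if_neg hmk, selections_map, List.flatMap_map]
      unfold omaxL
      rw [omaxL_flatMap]
      rw [selections_nodup free hnd, List.foldl_map]
      rw [Bval, if_neg hmk, List.foldl_map]
      apply PySem.List.foldl_congr_mem
      intro acc s hs
      simp only [Function.comp_apply]
      rw [omaxL_map_add]
      rw [ih (k + 1) (free.filter (fun t => t != s)) (by omega) (hnd.filter _)]

def freeOf (n mask : Nat) : List Nat :=
  (List.range n).filter (fun s => decide ((mask >>> s) &&& 1 = 0))

def kOf (n mask : Nat) : Nat := n - (freeOf n mask).length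

def INV (ability : List (List Int)) (n m : Nat) (memo : PySem.Dict Nat (Option Int)) : Prop :=
  ∀ mask v, memo.get? mask = some v → v = Bval ability m (kOf n mask) (freeOf n mask)

theorem bitfree_or (mask s t : Nat) :
    (((mask ||| (1 <<< s)) >>> t) &&& 1 = 0) ↔ ((mask >>> t) &&& 1 = 0 ∧ t ≠ s) := by
  have hb : ∀ (x t : Nat), ((x >>> t) &&& 1 = 0) ↔ x.testBit t = false := by
    intro x t
    simp [Nat.testBit, Nat.and_one_is_mod]
  rw [hb, hb]
  simp only [Nat.testBit_or, Nat.one_shiftLeft, Nat.testBit_two_pow,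
    Bool.or_eq_false_iff, decide_eq_false_iff_not]
  constructor
  · rintro ⟨h1, h2⟩; exact ⟨h1, fun he => h2 he.symm⟩
  · rintro ⟨h1, h2⟩; exact ⟨h1, fun he => h2 he.symm⟩

theorem freeOf_or (n mask s : Nat) :
    freeOf n (mask ||| (1 <<< s)) = (freeOf n mask).filter (fun t => t != s) := by
  unfold freeOf
  rw [List.filter_filter]
  apply List.filter_congr
  intro t _
  have := bitfree_or mask s t
  by_cases h1 : ((mask ||| 1 <<< s) >>> t) &&& 1 = 0
  · have h2 := this.mp h1
    simp [h1, h2.1, h2.2]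
  · simp only [decide_eq_true_eq] at *
    by_cases h3 : (mask >>> t) &&& 1 = 0 <;> by_cases h4 : t = s <;>
      simp_all

theorem nodup_freeOf (n mask : Nat) : (freeOf n mask).Nodup :=
  List.nodup_range.filter _

theorem mem_freeOf_iff (n mask s : Nat) : s ∈ freeOf n mask ↔ s < n ∧ (mask >>> s) &&& 1 = 0 := by
  simp [freeOf, List.mem_filter, List.mem_range]

theorem kOf_or (n mask s : Nat) (hs : s < n) (hfree : (mask >>> s) &&& 1 = 0) :
    kOf n (mask ||| (1 <<< s)) = kOf n mask + 1 := by
  have h1 := freeOf_or n mask s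
  have hm : s ∈ freeOf n mask := (mem_freeOf_iff n mask s).mpr ⟨hs, hfree⟩
  have hnd := nodup_freeOf n mask
  have h2 : (freeOf n mask).filter (fun t => t != s) = (freeOf n mask).erase s :=
    (hnd.erase_eq_filter s).symm
  have h3 : ((freeOf n mask).erase s).length = (freeOf n mask).length - 1 :=
    List.length_erase_of_mem hm
  have h4 : (freeOf n mask).length ≤ n := by
    have h6 : (List.range n).length = n := List.length_range
    exact le_trans (List.length_filter_le _ _) (le_of_eq h6)
  have h5 : 0 < (freeOf n mask).length := List.length_pos_of_mem hm
  unfold kOf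
  rw [h1, h2, h3]
  omega

theorem bestA_spec (ability : List (List Int)) (n m : Nat) : ∀ (fuel k mask : Nat)
    (memo : PySem.Dict Nat (Option Int)), fuel = m - k → kOf n mask = k → INV ability n m memo →
    (bestA ability n m mask k memo).1 = Bval ability m k (freeOf n mask) ∧
      INV ability n m (bestA ability n m mask k memo).2 := by
  intro fuel
  induction fuel with
  | zero =>
    intro k mask memo hf hk hinv
    have hmk : m ≤ k := by omega
    rw [bestA, if_pos hmk, Bval, if_pos hmk]
    exact ⟨rfl, hinv⟩
  | succ fuel ih =>
    intro k mask memo hf hk hinv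
    by_cases hmk : m ≤ k
    · rw [bestA, if_pos hmk, Bval, if_pos hmk]
      exact ⟨rfl, hinv⟩
    · have loop : ∀ (ss : List Nat) (res : Option Int) (memo' : PySem.Dict Nat (Option Int)),
          (∀ s ∈ ss, s < n) → INV ability n m memo' →
          (bestLoop ability n m mask k ss res memo').1
            = ss.foldl (fun r s => if (mask >>> s) &&& 1 = 0 then
                ocomb r ((Bval ability m (k + 1) (freeOf n (mask ||| (1 <<< s)))).map
                  (fun sv => (ability.getD s []).getD k 0 + sv)) else r) res
            ∧ INV ability n m (bestLoop ability n m mask k ss res memo').2 := by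
        intro ss
        induction ss with
        | nil =>
          intro res memo' _ hinv'
          rw [bestLoop]
          exact ⟨rfl, hinv'⟩
        | cons s rest ihs =>
          intro res memo' hlt hinv'
          have hs : s < n := hlt s List.mem_cons_self
          have hrest : ∀ t ∈ rest, t < n := fun t ht => hlt t (List.mem_cons_of_mem s ht)
          by_cases hbit : (mask >>> s) &&& 1 = 0
          · have hk1 : kOf n (mask ||| (1 <<< s)) = k + 1 := by
              rw [kOf_or n mask s hs hbit, hk]
            have hA := ih (k + 1) (mask ||| (1 <<< s)) memo' (by omega) hk1 hinv'
            rw [bestLoop]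
            simp only [if_pos hbit, List.foldl_cons, if_pos hbit]
            rw [← hA.1]
            cases hp : (bestA ability n m (mask ||| (1 <<< s)) (k + 1) memo').1 with
            | none =>
              simp only [hp, Option.map_none]
              exact ihs res _ hrest hA.2
            | some subv =>
              simp only [hp, Option.map_some, PySem.List.pyGetD_natCast]
              exact ihs _ _ hrest hA.2
          · rw [bestLoop]
            simp only [if_neg hbit, List.foldl_cons]
            exact ihs res memo' hrest hinv'
      have hpair : bestA ability n m mask k memo
          = ((bestLoop ability n m mask k (List.range n) none memo).1,
             (bestLoop ability n m mask k (List.range n) none memo).2.insert mask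
               (bestLoop ability n m mask k (List.range n) none memo).1) ∨
          ∃ v, memo.get? mask = some v ∧ bestA ability n m mask k memo = (v, memo) := by
        cases hm : memo.get? mask with
        | some v =>
          right
          refine ⟨v, rfl, ?_⟩
          rw [bestA]
          simp only [if_neg hmk, hm]
        | none =>
          left
          rw [bestA]
          simp only [if_neg hmk, hm]
      rcases hpair with hpair | ⟨v, hm, hpair⟩
      · obtain ⟨h1, h2⟩ := loop (List.range n) none memo (fun s hs => List.mem_range.mp hs) hinv
        have hfold : (List.range n).foldl (fun r s => if (mask >>> s) &&& 1 = 0 then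
              ocomb r ((Bval ability m (k + 1) (freeOf n (mask ||| (1 <<< s)))).map
                (fun sv => (ability.getD s []).getD k 0 + sv)) else r) none
            = Bval ability m k (freeOf n mask) := by
          rw [PySem.List.foldl_ite_eq_foldl_filter]
          simp only [freeOf_or]
          rw [Bval, if_neg hmk, List.foldl_map]
          rfl
        rw [hpair]
        constructor
        · show (bestLoop ability n m mask k (List.range n) none memo).1 = _
          rw [h1, hfold]
        · intro mask' v' hget
          by_cases hmm' : mask' = mask
          · subst hmm'
            rw [PySem.Dict.get?_insert_self] at hget
            have hv' : v' = (bestLoop ability n m mask' k (List.range n) none memo).1 :=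
              (Option.some_inj.mp hget).symm
            rw [hv', h1, hfold, hk]
          · rw [PySem.Dict.get?_insert_of_ne _ _ hmm'] at hget
            exact h2 mask' v' hget
      · rw [hpair]
        refine ⟨?_, hinv⟩
        show v = _
        have hv := hinv mask v hm
        rw [hv, hk]

-- ===== VERDICT (by name: the statement is the Claim_ definition above) =====
theorem solution_spec : Claim_equal_solution := by
  intro ability _ hpre
  obtain ⟨hne, hm1, _⟩ := hpre
  have hpg : PySem.List.pyGetD ability (0 : Int) [] = ability.headD [] := by
    cases ability with
    | nil => rfl
    | cons x xs => rw [PySem.List.pyGetD_zero_cons]; rfl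
  show solution ability = solution_alt ability
  have hm : 1 ≤ (PySem.List.pyGetD ability (0 : Int) []).length := by
    rw [hpg]; exact hm1
  rw [solution_eq ability hm, foldl_max_elim]
  have halt : solution_alt ability
      = (match (bestA ability ability.length (PySem.List.pyGetD ability (0 : Int) []).length
          0 0 PySem.Dict.empty).1 with
        | some rv => max 0 rv
        | none => 0) := rfl
  rw [halt]
  have hfree0 : freeOf ability.length 0 = List.range ability.length := by
    unfold freeOf
    rw [List.filter_eq_self]
    intro s _
    simp
  have hk0 : kOf ability.length 0 = 0 := by
    unfold kOf
    rw [hfree0, List.length_range]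
    omega
  have hinv0 : INV ability ability.length (PySem.List.pyGetD ability (0 : Int) []).length
      PySem.Dict.empty := by
    intro mask v hv
    simp [pysem] at hv
  have hb := (bestA_spec ability ability.length
    (PySem.List.pyGetD ability (0 : Int) []).length
    ((PySem.List.pyGetD ability (0 : Int) []).length - 0) 0 0 PySem.Dict.empty rfl hk0 hinv0).1
  rw [hb, hfree0]
  have hs := sums_Bval ability (PySem.List.pyGetD ability (0 : Int) []).length
    ((PySem.List.pyGetD ability (0 : Int) []).length - 0) 0 (List.range ability.length) rfl
    List.nodup_range
  rw [map_getD_range] at hs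
  rw [← hs]
  cases h : omaxL (sums (PySem.List.pyGetD ability (0 : Int) []).length 0 ability) with
  | none => rfl
  | some v => rfl
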